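-- pv_equiv track=rewrite | github.com/updaun/CodingTest | programmers/221218_6.py | solution
-- ===== SOURCE A (Python) =====
-- def solution(num, total):
--     mid = total//num
--     answer = [mid]
--     temp = 1
--     while len(answer) < num:
--         if len(answer) % 2 == 0:
--             answer.append(mid - temp)
--             temp += 1
--         else:
--             answer.append(mid + temp)
--     return sorted(answer)
-- ===== SOURCE B (Python) =====
-- def solution(num, total):
--     # closed form: the sorted result is num consecutive ints starting at
--     # total//num - (num-1)//2; no list building loop, no sort.
--     start = total // num - (num - 1) // 2
--     return list(range(start, start + num))
-- ===== Notes on version B (the rewrite author's own statement) =====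
-- stated objective: faster
-- what changed: Replaces the element-by-element zig-zag construction plus sort with a closed form: the answer is the num consecutive integers starting at total//num - (num-1)//2, emitted directly by range.
-- outside the precondition, e.g. on solution(-2, 7): A returns [-4], B returns []
import Mathlib
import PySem

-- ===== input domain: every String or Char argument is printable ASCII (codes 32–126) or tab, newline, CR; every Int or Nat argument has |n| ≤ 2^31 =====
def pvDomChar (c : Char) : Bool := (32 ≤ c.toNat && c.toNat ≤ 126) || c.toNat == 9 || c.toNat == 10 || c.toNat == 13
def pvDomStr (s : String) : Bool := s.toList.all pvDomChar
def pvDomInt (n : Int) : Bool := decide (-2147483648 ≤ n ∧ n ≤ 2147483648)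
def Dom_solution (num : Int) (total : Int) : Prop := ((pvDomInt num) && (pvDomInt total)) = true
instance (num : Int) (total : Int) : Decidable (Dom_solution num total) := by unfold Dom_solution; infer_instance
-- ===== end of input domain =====

-- B replaces A's zig-zag build-then-sort with a closed-form range; objective: faster (O(num) vs O(num log num)).


-- ===== PORT A =====
-- while len(answer) < num: append mid-temp / mid+temp alternately; fuel = num.toNat bounds the loop
def solutionLoop (num mid : Int) : Nat → List Int → Int → List Int
  | 0, answer, _ => answer
  | fuel + 1, answer, temp =>
    if (answer.length : Int) < num then
      if answer.length % 2 == 0 then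
        solutionLoop num mid fuel (answer ++ [mid - temp]) (temp + 1)
      else
        solutionLoop num mid fuel (answer ++ [mid + temp]) temp
    else answer

def solution (num : Int) (total : Int) : List Int :=
  let mid := PySem.Int.floordiv total num
  PySem.List.sorted (solutionLoop num mid num.toNat [mid] 1) (fun x => x) false

-- ===== PORT B =====
def solution_alt (num : Int) (total : Int) : List Int :=
  let start := PySem.Int.floordiv total num - PySem.Int.floordiv (num - 1) 2
  PySem.List.pyRange start (start + num) 1

-- ===== PRECONDITION & SPEC =====
-- Pre_ restricts to the task's natural domain num ≥ 1: A raises ZeroDivisionError at num = 0,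
-- and for negative num its loop never runs, so its one-element value there is an accident of the loop guard.
def Pre_solution (num : Int) (total : Int) : Prop := 1 ≤ num
instance (num : Int) (total : Int) : Decidable (Pre_solution num total) := by unfold Pre_solution; infer_instance
def pvWitness_solution : Int × Int := (3, 7)
def Spec_solution (num : Int) (total : Int) (out : List Int) : Prop := out = solution_alt num total
instance (num : Int) (total : Int) (out : List Int) : Decidable (Spec_solution num total out) := by unfold Spec_solution; infer_instance

-- ===== CLAIM (what is proved, stated in full; the proofs are below) =====
def Claim_equal_solution : Prop := ∀ (num : Int) (total : Int), Dom_solution num total → Pre_solution num total → Spec_solution num total (solution num total)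

-- ===== LEMMAS AND PROOFS =====

-- Loop invariant: with a elements below mid and b at-or-above-mid extras appended so far
-- (b = a or a + 1), answer is a permutation of range(mid-a, mid+b+1) and temp = a+1;
-- the final answer is a permutation of range(mid - (N-1)/2, mid + N/2 + 1), N = num.toNat.
lemma solutionLoop_perm (num mid : Int) :
    ∀ (fuel a b : Nat) (answer : List Int) (temp : Int),
      answer.length = a + b + 1 →
      (b = a ∨ b = a + 1) →
      temp = (a : Int) + 1 →
      answer.Perm (PySem.List.pyRange (mid - (a : Int)) (mid + (b : Int) + 1) 1) →
      num.toNat ≤ fuel + (a + b + 1) →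
      a + b + 1 ≤ num.toNat →
      (solutionLoop num mid fuel answer temp).Perm
        (PySem.List.pyRange (mid - (((num.toNat - 1) / 2 : Nat) : Int))
          (mid + ((num.toNat / 2 : Nat) : Int) + 1) 1) := by
  intro fuel
  induction fuel with
  | zero =>
    intro a b answer temp hlen hab htemp hperm hge hle
    have ha : a = (num.toNat - 1) / 2 := by omega
    have hb : b = num.toNat / 2 := by omega
    subst ha; subst hb
    simp only [solutionLoop]
    exact hperm
  | succ n ih =>
    intro a b answer temp hlen hab htemp hperm hge hle
    rw [solutionLoop]
    by_cases hguard : (answer.length : Int) < num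
    · rw [if_pos hguard]
      rcases hab with hba | hba
      · -- length = 2a+1, odd: else branch, append mid + temp
        have hmod : (answer.length % 2 == 0) = false := by
          simp [hlen, hba]; omega
        rw [hmod]
        simp only [Bool.false_eq_true, if_false]
        apply ih a (b + 1) _ temp (by simp [hlen]; omega) (by omega) htemp
        · have hsplit : PySem.List.pyRange (mid - (a : Int)) (mid + ((b : Int) + 1) + 1) 1
              = PySem.List.pyRange (mid - (a : Int)) (mid + (b : Int) + 1) 1 ++ [mid + (b : Int) + 1] := by
            have h1 : mid - (a : Int) ≤ mid + (b : Int) + 1 := by omega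
            have := PySem.List.pyRange_one_succ_right h1
            rw [← this]; ring_nf
          have : (answer ++ [mid + temp]).Perm
              (PySem.List.pyRange (mid - (a : Int)) (mid + (b : Int) + 1) 1 ++ [mid + (b : Int) + 1]) := by
            have hx : mid + temp = mid + (b : Int) + 1 := by rw [htemp, hba]; ring
            rw [hx]
            exact hperm.append_right _
          push_cast
          push_cast at hsplit this
          rw [hsplit]
          exact this
        · omega
        · omega
      · -- length = 2a+2, even: then branch, append mid - temp, temp + 1
        have hmod : (answer.length % 2 == 0) = true := by
          simp [hlen, hba]; omega
        rw [hmod]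
        simp only [if_true]
        apply ih (a + 1) b _ (temp + 1) (by simp [hlen]; omega) (by omega) (by rw [htemp]; push_cast; try ring)
        · have hcons : PySem.List.pyRange (mid - ((a : Int) + 1)) (mid + (b : Int) + 1) 1
              = (mid - ((a : Int) + 1)) :: PySem.List.pyRange (mid - (a : Int)) (mid + (b : Int) + 1) 1 := by
            have h1 : mid - ((a : Int) + 1) < mid + (b : Int) + 1 := by omega
            have := PySem.List.pyRange_one_cons h1
            rw [this]; ring_nf
          have : (answer ++ [mid - temp]).Perm
              ((mid - ((a : Int) + 1)) :: PySem.List.pyRange (mid - (a : Int)) (mid + (b : Int) + 1) 1) := by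
            have hx : mid - temp = mid - ((a : Int) + 1) := by rw [htemp]
            rw [hx]
            exact (List.perm_append_singleton _ _).trans (hperm.cons _)
          push_cast
          push_cast at hcons this
          rw [hcons]
          exact this
        · omega
        · omega
    · -- guard false: len ≥ num, hence len = num.toNat
      have ha : a = (num.toNat - 1) / 2 := by omega
      have hb : b = num.toNat / 2 := by omega
      subst ha; subst hb
      rw [if_neg hguard]
      exact hperm

-- ===== VERDICT (by name: the statement is the Claim_ definition above) =====
theorem solution_spec : Claim_equal_solution := by
  intro num total _ hpre
  unfold Pre_solution at hpre
  unfold Spec_solution solution solution_alt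
  set mid := PySem.Int.floordiv total num with hmid
  show PySem.List.sorted (solutionLoop num mid num.toNat [mid] 1) (fun x => x) false
      = PySem.List.pyRange (mid - PySem.Int.floordiv (num - 1) 2)
          (mid - PySem.Int.floordiv (num - 1) 2 + num) 1
  have hperm := solutionLoop_perm num mid num.toNat 0 0 [mid] 1
    (by simp) (Or.inl rfl) (by simp)
    (by simp [PySem.List.pyRange_one_singleton])
    (by omega) (by omega)
  have hstart : mid - PySem.Int.floordiv (num - 1) 2
      = mid - (((num.toNat - 1) / 2 : Nat) : Int) := by
    rw [PySem.Int.floordiv_eq_ediv_of_pos (by omega : (0:Int) < 2)]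
    omega
  have hend : mid - (((num.toNat - 1) / 2 : Nat) : Int) + num
      = mid + ((num.toNat / 2 : Nat) : Int) + 1 := by omega
  rw [hstart, hend]
  exact PySem.List.sorted_eq_of_perm_of_pairwise_lt _ _ (fun x => x) hperm.symm
    (PySem.List.pairwise_lt_pyRange_one _ _)
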